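-- pv_equiv track=rewrite | github.com/MAINSETS/Kriptografi | Tugas 1/chiper.py | fiveletter
-- ===== SOURCE A (Python) =====
-- def fiveletter(text):
--     newtext = ""
--     count = 0
--     for i in text:
--         if count%5 == 0:
--             newtext = newtext + " "
--         newtext = newtext + i
--         count = count + 1
--     return newtext
-- ===== SOURCE B (Python) =====
-- def fiveletter(text):
--     return "".join(" " + text[i:i+5] for i in range(0, len(text), 5))
-- ===== Notes on version B (the rewrite author's own statement) =====
-- stated objective: simpler
-- what changed: Replaces the char-by-char loop with a modular counter by slicing the text into 5-character blocks and joining each block prefixed with a space.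
import Mathlib
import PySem

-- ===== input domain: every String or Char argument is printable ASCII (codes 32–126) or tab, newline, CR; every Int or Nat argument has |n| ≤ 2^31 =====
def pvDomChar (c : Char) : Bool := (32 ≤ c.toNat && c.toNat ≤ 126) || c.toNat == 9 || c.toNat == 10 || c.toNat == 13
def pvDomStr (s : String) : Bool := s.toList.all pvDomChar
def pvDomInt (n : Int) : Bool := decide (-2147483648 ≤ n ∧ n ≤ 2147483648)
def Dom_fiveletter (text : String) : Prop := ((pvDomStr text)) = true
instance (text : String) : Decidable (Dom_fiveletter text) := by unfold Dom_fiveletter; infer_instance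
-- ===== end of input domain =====

-- B groups the text by slicing 5-character blocks and joining them instead of
-- A's per-character loop with a modular counter (objective: simpler).

-- ===== PORT A =====
-- the loop body: 'if count%5 == 0: newtext += " "' then 'newtext += i; count += 1'
def fiveletterStep (st : List Char × Int) (i : Char) : List Char × Int :=
  ((if PySem.Int.mod st.2 5 == 0 then st.1 ++ [' '] else st.1) ++ [i], st.2 + 1)

def fiveletter (text : String) : String :=
  String.ofList (text.toList.foldl fiveletterStep ([], 0)).1

-- ===== PORT B =====
-- "".join(" " + text[i:i+5] for i in range(0, len(text), 5))
def fiveletter_alt (text : String) : String :=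
  String.ofList
    (((PySem.List.pyRange 0 (PySem.Str.len text) 5).map
        (fun i => ' ' :: PySem.List.slice text.toList (some i) (some (i + 5)))).flatten)

-- ===== PRECONDITION & SPEC =====
def Spec_fiveletter (text : String) (out : String) : Prop := out = fiveletter_alt text
instance (text : String) (out : String) : Decidable (Spec_fiveletter text out) := by unfold Spec_fiveletter; infer_instance

-- ===== CLAIM (what is proved, stated in full; the proofs are below) =====
def Claim_equal_fiveletter : Prop := ∀ (text : String), Dom_fiveletter text → Spec_fiveletter text (fiveletter text)

-- ===== LEMMAS AND PROOFS =====

-- common shape: the space-prefixed 5-blocks of a char list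
def pvBlocks : List Char → List Char
  | [] => []
  | h :: t => ' ' :: h :: (t.take 4 ++ pvBlocks (t.drop 4))
termination_by l => l.length
decreasing_by simp

lemma pyRange5_cons (a b : Int) (h : a < b) :
    PySem.List.pyRange a b 5 = a :: PySem.List.pyRange (a + 5) b 5 := by
  simp only [PySem.List.pyRange]
  norm_num [h]
  by_cases h2 : a + 5 < b
  · have hn : ((b - a + 5 - 1) / 5).toNat = ((b - (a + 5) + 5 - 1) / 5).toNat + 1 := by omega
    rw [if_pos h2, hn, List.range_succ_eq_map, List.map_cons]
    simp [Function.comp]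
    intro k _; ring
  · have hn : ((b - a + 5 - 1) / 5).toNat = 1 := by omega
    rw [if_neg h2, hn]
    simp

-- A's loop over chars whose counters all avoid 0 mod 5 just appends them
lemma foldA_noSpace (m : List Char) (acc : List Char) (c : Int) (h0 : 0 ≤ c)
    (h : ∀ k : Nat, k < m.length → PySem.Int.mod (c + k) 5 ≠ 0) :
    m.foldl fiveletterStep (acc, c) = (acc ++ m, c + m.length) := by
  induction m generalizing acc c with
  | nil => simp
  | cons x t ih =>
    have h0' : PySem.Int.mod c 5 ≠ 0 := by
      have := h 0 (by simp); simpa using this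
    simp only [List.foldl_cons, fiveletterStep, beq_iff_eq, if_neg h0']
    rw [ih (acc ++ [x]) (c + 1) (by omega)
        (fun k hk => by
          have := h (k + 1) (by simpa using Nat.succ_lt_succ hk)
          have e : c + 1 + (k : Int) = c + ((k : Int) + 1) := by ring
          rw [e]; exact_mod_cast this)]
    simp
    ring

-- A's loop, started at a counter that is 0 mod 5, produces the 5-blocks
lemma foldA_blocks (n : Nat) : ∀ (l : List Char) (acc : List Char) (c : Int),
    l.length ≤ n → 0 ≤ c → PySem.Int.mod c 5 = 0 →
    (l.foldl fiveletterStep (acc, c)).1 = acc ++ pvBlocks l := by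
  induction n with
  | zero =>
    intro l acc c hl _ _
    have : l = [] := List.eq_nil_of_length_eq_zero (by omega)
    subst this; simp [pvBlocks]
  | succ n ih =>
    intro l acc c hl h0 hc
    cases l with
    | nil => simp [pvBlocks]
    | cons x t =>
      have hce : c % 5 = 0 := by
        rwa [PySem.Int.mod_eq_emod_of_pos (by norm_num)] at hc
      simp only [List.foldl_cons, fiveletterStep, hc, beq_self_eq_true, if_pos]
      rw [show t = t.take 4 ++ t.drop 4 from (List.take_append_drop 4 t).symm,
        List.foldl_append,
        foldA_noSpace (t.take 4) (acc ++ [' '] ++ [x]) (c + 1) (by omega)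
          (by
            intro k hk
            have hk4 : k < 4 := lt_of_lt_of_le hk (by simp)
            rw [PySem.Int.mod_eq_emod_of_pos (by norm_num)]
            omega)]
      by_cases ht : t.length ≤ 4
      · have hd : t.drop 4 = [] := by
          apply List.eq_nil_of_length_eq_zero; simp; omega
        rw [hd]
        simp [pvBlocks]
      · have h4 : (t.take 4).length = 4 := by simp; omega
        rw [ih (t.drop 4) _ _ (by simp at hl ⊢; omega) (by omega)
          (by rw [PySem.Int.mod_eq_emod_of_pos (by norm_num)]; rw [h4]; push_cast; omega)]
        simp [pvBlocks]

lemma pyRange5_nil (a b : Int) (h : b ≤ a) : PySem.List.pyRange a b 5 = [] := by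
  simp [PySem.List.pyRange]; omega

lemma pyRange5_shift (b : Int) :
    PySem.List.pyRange 5 b 5 = (PySem.List.pyRange 0 (b - 5) 5).map (· + 5) := by
  simp only [PySem.List.pyRange]
  norm_num
  by_cases h : 5 < b
  · intro a _; ring
  · intro a _; ring

-- B's slicing grid over the list produces the same 5-blocks
lemma mapB_blocks (n : Nat) : ∀ (l : List Char), l.length ≤ n →
    ((PySem.List.pyRange 0 (l.length : Int) 5).map
        (fun i => ' ' :: PySem.List.slice l (some i) (some (i + 5)))).flatten = pvBlocks l := by
  induction n with
  | zero =>
    intro l hl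
    have : l = [] := List.eq_nil_of_length_eq_zero (by omega)
    subst this
    simp only [List.length_nil, Nat.cast_zero]
    rw [pyRange5_nil 0 0 le_rfl]; simp [pvBlocks]
  | succ n ih =>
    intro l hl
    cases l with
    | nil =>
      simp only [List.length_nil, Nat.cast_zero]
      rw [pyRange5_nil 0 0 le_rfl]; simp [pvBlocks]
    | cons x t =>
      rw [pyRange5_cons 0 (((x :: t).length : Int)) (by simp)]
      simp only [List.map_cons, List.flatten_cons, zero_add]
      have hslice0 : PySem.List.slice (x :: t) (some 0) (some 5) = x :: t.take 4 := by
        rw [PySem.List.slice_zero_start, PySem.List.slice_to (x :: t) (by norm_num : (0:Int) ≤ 5)]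
        simp [List.take_succ_cons]
      by_cases ht : (x :: t).length ≤ 5
      · rw [pyRange5_nil 5 _ (by exact_mod_cast ht)]
        have hd : t.drop 4 = [] := by
          apply List.eq_nil_of_length_eq_zero; simp at ht ⊢; omega
        simp [hslice0, pvBlocks, hd]
      · rw [pyRange5_shift, List.map_map]
        have hlen5 : ((t.drop 4).length : Int) = ((x :: t).length : Int) - 5 := by
          simp at ht ⊢; omega
        have hcong : ((PySem.List.pyRange 0 (((x :: t).length : Int) - 5) 5).map
            ((fun i => ' ' :: PySem.List.slice (x :: t) (some i) (some (i + 5))) ∘ (· + 5))) =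
            (PySem.List.pyRange 0 (((t.drop 4).length : Int)) 5).map
              (fun i => ' ' :: PySem.List.slice (t.drop 4) (some i) (some (i + 5))) := by
          rw [hlen5]
          apply List.map_congr_left
          intro i hi
          have hi0 : 0 ≤ i := by
            have := ((PySem.List.mem_pyRange_iff_of_pos (by norm_num : (0:Int) < 5) i).1 hi).1
            omega
          simp only [Function.comp_apply]
          congr 1
          rw [PySem.List.slice_toNat (x :: t) (by omega) (by omega),
            PySem.List.slice_toNat (t.drop 4) hi0 (by omega)]
          have e1 : (i + 5).toNat = i.toNat + 5 := by omega
          rw [e1]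
          have e2 : (i + 5 + 5).toNat - (i.toNat + 5) = 5 := by omega
          have e3 : i.toNat + 5 - i.toNat = 5 := by omega
          rw [e2, e3]
          have e4 : i.toNat + 5 = (i.toNat + 4) + 1 := by omega
          rw [e4, List.drop_succ_cons, List.drop_drop, Nat.add_comm 4 i.toNat]
        rw [hcong, ih (t.drop 4) (by simp at hl ⊢; omega)]
        simp [hslice0, pvBlocks]

-- ===== VERDICT (by name: the statement is the Claim_ definition above) =====
theorem fiveletter_spec : Claim_equal_fiveletter := by
  intro text _
  unfold Spec_fiveletter fiveletter fiveletter_alt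
  rw [foldA_blocks text.toList.length text.toList [] 0 le_rfl le_rfl (by decide)]
  rw [show PySem.Str.len text = ((text.toList.length : Nat) : Int) from by
    simp [PySem.Str.len_eq]]
  rw [mapB_blocks text.toList.length text.toList le_rfl]
  simp
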